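-- pv_equiv track=rewrite | github.com/kristopher-miles/threadspeak-audiobook | app/script_repair.py | _expand_right_to_boundary
-- ===== SOURCE A (Python) =====
-- def _expand_right_to_boundary(text, end):
--     end = min(len(text), end)
--     window = text[end:min(len(text), end + 160)]
--     candidates = [pos for pos in (window.find("\n\n"), window.find(". "), window.find("! "), window.find("? ")) if pos != -1]
--     if not candidates:
--         space = window.find(" ")
--         if space == -1:
--             return end
--         return min(len(text), end + space)
--     return min(len(text), end + min(candidates) + 1)
-- ===== SOURCE B (Python) =====
-- def _expand_right_to_boundary(text, end):
--     end = min(len(text), end)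
--     window = text[end:min(len(text), end + 160)]
--     first_space = -1
--     for i in range(len(window)):
--         if window[i:i + 2] in ("\n\n", ". ", "! ", "? "):
--             return min(len(text), end + i + 1)
--         if first_space == -1 and window[i] == " ":
--             first_space = i
--     if first_space == -1:
--         return end
--     return min(len(text), end + first_space)
-- ===== Notes on version B (the rewrite author's own statement) =====
-- stated objective: alternative
-- what changed: A runs four independent whole-window str.find scans plus a filter/min over the results (and a separate find for the fallback space); B makes a single left-to-right pass over the window that returns at the first boundary pair and records the first space on the way.
import Mathlib
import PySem

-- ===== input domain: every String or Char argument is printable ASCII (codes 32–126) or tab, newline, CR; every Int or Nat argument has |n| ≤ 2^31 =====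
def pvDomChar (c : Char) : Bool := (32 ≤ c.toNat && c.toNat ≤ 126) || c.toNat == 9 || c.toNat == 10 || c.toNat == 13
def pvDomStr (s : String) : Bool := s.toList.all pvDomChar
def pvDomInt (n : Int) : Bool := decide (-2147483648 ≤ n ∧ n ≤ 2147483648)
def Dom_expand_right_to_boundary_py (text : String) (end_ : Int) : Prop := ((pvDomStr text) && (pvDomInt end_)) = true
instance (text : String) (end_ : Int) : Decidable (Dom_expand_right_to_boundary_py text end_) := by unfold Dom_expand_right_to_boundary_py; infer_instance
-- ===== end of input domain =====

-- B replaces A's four whole-window `find`s + filter/min with one left-to-right scan that stops at the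
-- first boundary pair and remembers the first space on the way (objective: alternative decomposition).

-- ===== PORT A =====
-- literal port of Source A: window = text[end:min(len,end+160)], four str.find calls, filter out -1, min
def expand_right_to_boundary_py (text : String) (end_ : Int) : Int :=
  let s := text.toList
  let len : Int := s.length
  let e := min len end_
  let window := PySem.List.slice s (some e) (some (min len (e + 160)))
  let candidates := ([PySem.Chars.find window ['\n', '\n'], PySem.Chars.find window ['.', ' '],
      PySem.Chars.find window ['!', ' '], PySem.Chars.find window ['?', ' ']]).filter (fun p => p != -1)
  if candidates = [] then
    let space := PySem.Chars.find window [' ']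
    if space = -1 then e else min len (e + space)
  else
    min len (e + (PySem.List.min? candidates (fun x => x)).getD 0 + 1)

-- ===== PORT B =====
-- `window[i:i+2] in ("\n\n", ". ", "! ", "? ")` of Source B: the 2-char slice at i equals a pair iff the
-- char at i and the (optional) char at i+1 match it — exact, since a 1-char slice never equals a pair.
def pvBoundaryPair (c : Char) (n? : Option Char) : Bool :=
  ((c == '\n') && (n? == some '\n')) || ((c == '.') && (n? == some ' ')) ||
  ((c == '!') && (n? == some ' ')) || ((c == '?') && (n? == some ' '))

-- the single loop of Source B: i is the current window index, fs the recorded first-space index (-1 = none)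
def pvScan (len e : Int) : List Char → Int → Int → Int
  | [], _, fs => if fs = -1 then e else min len (e + fs)
  | c :: rest, i, fs =>
      if pvBoundaryPair c rest.head? then min len (e + i + 1)
      else pvScan len e rest (i + 1) (if fs == -1 && c == ' ' then i else fs)

def expand_right_to_boundary_py_alt (text : String) (end_ : Int) : Int :=
  let s := text.toList
  let len : Int := s.length
  let e := min len end_
  let window := PySem.List.slice s (some e) (some (min len (e + 160)))
  pvScan len e window 0 (-1)

-- ===== PRECONDITION & SPEC =====
def Spec_expand_right_to_boundary_py (text : String) (end_ : Int) (out : Int) : Prop := out = expand_right_to_boundary_py_alt text end_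
instance (text : String) (end_ : Int) (out : Int) : Decidable (Spec_expand_right_to_boundary_py text end_ out) := by unfold Spec_expand_right_to_boundary_py; infer_instance

-- ===== CLAIM (what is proved, stated in full; the proofs are below) =====
def Claim_equal_expand_right_to_boundary_py : Prop := ∀ (text : String) (end_ : Int), Dom_expand_right_to_boundary_py text end_ → Spec_expand_right_to_boundary_py text end_ (expand_right_to_boundary_py text end_)

-- ===== LEMMAS AND PROOFS =====

-- first index of the pair [a, b] in w
def pvFbP (a b : Char) : List Char → Option Nat
  | [] => none
  | c :: cs => if c = a ∧ cs.head? = some b then some 0 else (pvFbP a b cs).map (· + 1)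

-- first index of any of the four boundary pairs
def pvFb : List Char → Option Nat
  | [] => none
  | c :: cs => if pvBoundaryPair c cs.head? then some 0 else (pvFb cs).map (· + 1)

-- first index of ' '
def pvFs : List Char → Option Nat
  | [] => none
  | c :: cs => if c = ' ' then some 0 else (pvFs cs).map (· + 1)

def pvOptInt : Option Nat → Int
  | none => -1
  | some j => (j : Int)

def pvMinO : Option Nat → Option Nat → Option Nat
  | none, o => o
  | some a, none => some a
  | some a, some b => some (min a b)

lemma pvFind_eq_of (s sub : List Char) (k : Nat) (h1 : sub <+: s.drop k)
    (h2 : ∀ i < k, ¬ sub <+: s.drop i) : PySem.Chars.find s sub = (k : Int) := by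
  have hinf : sub <:+: s := (h1.isInfix).trans (s.drop_suffix k).isInfix
  have h0 : 0 ≤ PySem.Chars.find s sub := (PySem.Chars.find_nonneg_iff s sub).mpr hinf
  obtain ⟨hp, hmin⟩ := PySem.Chars.find_spec h0
  have : (PySem.Chars.find s sub).toNat = k := by
    rcases lt_trichotomy (PySem.Chars.find s sub).toNat k with h | h | h
    · exact absurd hp (h2 _ h)
    · exact h
    · exact absurd h1 (hmin _ h)
  omega

lemma pvFind_cons (c : Char) (cs sub : List Char) :
    PySem.Chars.find (c :: cs) sub =
      if sub <+: (c :: cs) then 0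
      else if PySem.Chars.find cs sub = -1 then -1 else PySem.Chars.find cs sub + 1 := by
  split_ifs with h1 h2
  · exact pvFind_eq_of _ _ 0 (by simpa using h1) (by omega)
  · rw [PySem.Chars.find_eq_neg_one_iff] at h2 ⊢
    intro hinf
    rcases List.infix_cons_iff.mp hinf with h | h
    · exact h1 h
    · exact h2 h
  · have h0 : 0 ≤ PySem.Chars.find cs sub := by
      have := PySem.Chars.neg_one_le_find (s := cs) (sub := sub)
      omega
    obtain ⟨hp, hmin⟩ := PySem.Chars.find_spec h0
    have := pvFind_eq_of (c :: cs) sub ((PySem.Chars.find cs sub).toNat + 1)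
      (by simpa using hp)
      (by
        intro i hi
        cases i with
        | zero => simpa using h1
        | succ j => exact fun hpre => hmin j (by omega) (by simpa using hpre))
    rw [this]; omega

lemma pvPair_prefix_iff (a b c : Char) (cs : List Char) :
    [a, b] <+: c :: cs ↔ (c = a ∧ cs.head? = some b) := by
  cases cs with
  | nil => simp [List.cons_prefix_cons]
  | cons d ds => simp [List.cons_prefix_cons]; aesop

lemma pvFind_pair (a b : Char) (w : List Char) :
    PySem.Chars.find w [a, b] = pvOptInt (pvFbP a b w) := by
  induction w with
  | nil =>
    have : ¬ ([a, b] <:+: ([] : List Char)) := by simp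
    simp [pvFbP, pvOptInt, (PySem.Chars.find_eq_neg_one_iff _ _).mpr this]
  | cons c cs ih =>
    rw [pvFind_cons]
    simp only [pvPair_prefix_iff]
    by_cases h : c = a ∧ cs.head? = some b
    · simp [pvFbP, h, pvOptInt]
    · simp only [pvFbP, h, if_neg h, if_false, ih]
      cases hfb : pvFbP a b cs <;> simp [pvOptInt, hfb]

lemma pvFind_space (w : List Char) : PySem.Chars.find w [' '] = pvOptInt (pvFs w) := by
  induction w with
  | nil =>
    have : ¬ ([' '] <:+: ([] : List Char)) := by simp
    simp [pvFs, pvOptInt, (PySem.Chars.find_eq_neg_one_iff _ _).mpr this]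
  | cons c cs ih =>
    rw [pvFind_cons]
    have hpre : ([' '] <+: c :: cs) ↔ c = ' ' := by
      simp [List.cons_prefix_cons]; aesop
    simp only [hpre]
    by_cases h : c = ' '
    · simp [pvFs, h, pvOptInt]
    · simp only [pvFs, if_neg h, ih]
      cases hfs : pvFs cs <;> simp [pvOptInt, hfs]

lemma pvMinO_zero_left (o : Option Nat) : pvMinO (some 0) o = some 0 := by
  rcases o <;> simp [pvMinO]

lemma pvMinO_zero_right (o : Option Nat) : pvMinO o (some 0) = some 0 := by
  rcases o <;> simp [pvMinO]

lemma pvCast_ne_neg_one (k : Nat) : (((k : Int)) != -1) = true := by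
  simp only [bne_iff_ne, ne_eq]
  omega

lemma pvMinO_map_succ (o1 o2 : Option Nat) :
    pvMinO (o1.map (· + 1)) (o2.map (· + 1)) = (pvMinO o1 o2).map (· + 1) := by
  rcases o1 <;> rcases o2 <;> simp [pvMinO] <;> omega

lemma pvFb_min (w : List Char) :
    pvFb w = pvMinO (pvMinO (pvFbP '\n' '\n' w) (pvFbP '.' ' ' w))
                    (pvMinO (pvFbP '!' ' ' w) (pvFbP '?' ' ' w)) := by
  induction w with
  | nil => simp [pvFb, pvFbP, pvMinO]
  | cons c cs ih =>
    by_cases hb : pvBoundaryPair c cs.head? = true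
    · have hd : (c = '\n' ∧ cs.head? = some '\n') ∨ (c = '.' ∧ cs.head? = some ' ') ∨
          (c = '!' ∧ cs.head? = some ' ') ∨ (c = '?' ∧ cs.head? = some ' ') := by
        simp [pvBoundaryPair] at hb; tauto
      simp only [pvFb, hb, if_true]
      by_cases c1 : (c = '\n' ∧ cs.head? = some '\n') <;>
        by_cases c2 : (c = '.' ∧ cs.head? = some ' ') <;>
        by_cases c3 : (c = '!' ∧ cs.head? = some ' ') <;>
        by_cases c4 : (c = '?' ∧ cs.head? = some ' ') <;>
        simp [pvFbP, c1, c2, c3, c4, pvMinO_zero_left, pvMinO_zero_right] <;> tauto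
    · have h1 : ¬ (c = '\n' ∧ cs.head? = some '\n') := by simp [pvBoundaryPair] at hb; tauto
      have h2 : ¬ (c = '.' ∧ cs.head? = some ' ') := by simp [pvBoundaryPair] at hb; tauto
      have h3 : ¬ (c = '!' ∧ cs.head? = some ' ') := by simp [pvBoundaryPair] at hb; tauto
      have h4 : ¬ (c = '?' ∧ cs.head? = some ' ') := by simp [pvBoundaryPair] at hb; tauto
      simp only [pvFb, hb, if_false, pvFbP, h1, h2, h3, h4, Bool.false_eq_true, ih,
        pvMinO_map_succ]

-- the canonical value both programs compute, as a function of len, e and the window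
def pvCanon (len e : Int) (w : List Char) : Int :=
  match pvFb w with
  | some j => min len (e + j + 1)
  | none => match pvFs w with
    | none => e
    | some s0 => min len (e + s0)

lemma pvA_eq (len e : Int) (w : List Char) :
    (let candidates := ([PySem.Chars.find w ['\n', '\n'], PySem.Chars.find w ['.', ' '],
        PySem.Chars.find w ['!', ' '], PySem.Chars.find w ['?', ' ']]).filter (fun p => p != -1)
     if candidates = [] then
       let space := PySem.Chars.find w [' ']
       if space = -1 then e else min len (e + space)
     else
       min len (e + (PySem.List.min? candidates (fun x => x)).getD 0 + 1)) = pvCanon len e w := by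
  simp only [pvFind_pair, pvFind_space, pvCanon, pvFb_min]
  rcases h1 : pvFbP '\n' '\n' w with _ | k1 <;>
  rcases h2 : pvFbP '.' ' ' w with _ | k2 <;>
  rcases h3 : pvFbP '!' ' ' w with _ | k3 <;>
  rcases h4 : pvFbP '?' ' ' w with _ | k4 <;>
    simp only [pvOptInt, pvMinO] <;>
    · rcases hs : pvFs w with _ | s0 <;>
        simp [pvOptInt, PySem.List.min?_id_cons, List.filter, pvCast_ne_neg_one, List.foldl, Nat.cast_min] <;> omega

lemma pvScan_eq (len e : Int) (w : List Char) (i fs : Int) (hi : 0 ≤ i) :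
    pvScan len e w i fs =
      match pvFb w with
      | some j => min len (e + (i + j) + 1)
      | none =>
        if fs = -1 then
          match pvFs w with
          | none => e
          | some s0 => min len (e + (i + s0))
        else min len (e + fs) := by
  induction w generalizing i fs with
  | nil => simp [pvScan, pvFb, pvFs]
  | cons c cs ih =>
    by_cases hb : pvBoundaryPair c cs.head? = true
    · simp [pvScan, hb, pvFb]
    · simp only [pvScan, hb, Bool.false_eq_true, if_false, pvFb, pvFs]
      rw [ih _ _ (by omega)]
      by_cases hsp : c = ' '
      · by_cases hfs : fs = -1
        · have hne : ¬ (i = -1) := by omega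
          simp only [hfs, hsp, beq_self_eq_true, Bool.and_self, if_true, if_pos,
            decide_true, Bool.and_true]
          cases hfb : pvFb cs <;> simp [hfb, hne] <;> (try (congr 1)) <;> omega
        · simp only [hsp, hfs, beq_iff_eq, if_neg hfs, decide_true]
          have : (fs == (-1 : Int)) = false := by simp [hfs]
          simp only [this, Bool.false_and, if_false]
          cases hfb : pvFb cs <;> (try simp [hfb, hfs]) <;> (try (congr 1)) <;> omega
      · have : (decide (c = ' ')) = false := by simp [hsp]
        try simp only [beq_iff_eq, this, Bool.and_false, if_false]
        cases hfb : pvFb cs <;> cases hfsl : pvFs cs <;>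
          by_cases hfs : fs = -1 <;> simp [hfb, hfsl, hsp, hfs] <;> (try (congr 1)) <;> omega

-- ===== VERDICT (by name: the statement is the Claim_ definition above) =====
theorem expand_right_to_boundary_py_spec : Claim_equal_expand_right_to_boundary_py := by
  intro text end_ _
  unfold Spec_expand_right_to_boundary_py expand_right_to_boundary_py expand_right_to_boundary_py_alt
  rw [pvA_eq, pvScan_eq _ _ _ _ _ (by omega)]
  cases hfb : pvFb (PySem.List.slice text.toList (some (min (text.toList.length : Int) end_))
      (some (min (text.toList.length : Int) (min (text.toList.length : Int) end_ + 160)))) with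
  | none =>
    simp only [pvCanon, hfb, if_true]
    cases pvFs (PySem.List.slice text.toList (some (min (text.toList.length : Int) end_))
        (some (min (text.toList.length : Int) (min (text.toList.length : Int) end_ + 160)))) with
    | none => rfl
    | some s0 => simp only []; congr 1; omega
  | some j =>
    simp only [pvCanon, hfb]
    congr 1
    omega
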